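-- pv_equiv track=rewrite | github.com/SteveBenz/python-wordle | wordle_module.py | getBestChoice
-- ===== SOURCE A (Python) =====
-- from typing import Tuple
--
-- def checkAnswer(guess: str,answer: str):
--     score: list[str] = []
--     used: list[str] = []
--     for i in range(len(answer)):
--         if guess[i] == answer[i]:
--             score.append("=")
--             used.append("y")
--         else:
--             score.append(" ")
--             used.append(" ")
--
--     for i in range(len(answer)):
--         if (score[i] != "="):
--             foundIndex = False
--             for j in range(len(answer)):
--                 if used[j] == " " and guess[i] == answer[j]:
--                     used[j] = "y"
--                     foundIndex = True
--                     break
--             score[i] = "^" if foundIndex else " "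
--     return ''.join(score)
--
-- def isEliminated(possibleAnswer: str, guess: str, clues: str):
--     isUsed = [False, False, False, False, False]
--     for i in range(len(guess)):
--         if clues[i] == '=':
--             if possibleAnswer[i] != guess[i]:
--                 return True
--             isUsed[i] = True
--
--     for i in range(len(guess)):
--         if clues[i] == ' ':
--             for j in range(len(guess)):
--                 if guess[i] == possibleAnswer[j] and not isUsed[j]:
--                     return True
--         elif clues[i] == '^':
--             if possibleAnswer[i] == guess[i]:
--                 return True
--             foundOne = False
--             for j in range(len(guess)):
--                 if guess[i] == possibleAnswer[j] and not isUsed[j]: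
--                     isUsed[j] = True
--                     foundOne = True
--                     break
--             if not foundOne:
--                 return True
--     return False
--
-- def getBestChoice(possibleAnswers: list[str], allAllowedWords: list[str]) -> Tuple[str,int]:
--     bestChoiceCount = 0
--     bestChoice = ""
--     for choice in allAllowedWords:
--         totalRemainingChoices = getRemainingChoiceCount(possibleAnswers, choice)
--         if bestChoiceCount == 0 or bestChoiceCount > totalRemainingChoices:
--             bestChoiceCount = totalRemainingChoices
--             bestChoice = choice
--     return bestChoice,bestChoiceCount
--
-- def getRemainingChoiceCount(possibleAnswers: list[str], choice: str):
--     totalRemainingChoices = 0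
--     for possibleTarget in possibleAnswers:
--         clue = checkAnswer(choice, possibleTarget)
--         for nextChoice in possibleAnswers:
--             if nextChoice != choice and not isEliminated(nextChoice, choice, clue):
--                 totalRemainingChoices += 1
--     return totalRemainingChoices
-- ===== SOURCE B (Python) =====
-- # B: memoizes the remaining-candidate count per distinct clue pattern (at most 3^L
-- # per guess), instead of recomputing the full elimination scan for every target;
-- # clue computation is count-based instead of A's greedy used-array scan.
-- # isEliminated is the module's helper, reused unchanged.
--
-- def checkAnswer(guess: str, answer: str):
--     n = len(answer)
--     green = [guess[i] == answer[i] for i in range(n)]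
--     avail = {}
--     for j in range(n):
--         if not green[j]:
--             avail[answer[j]] = avail.get(answer[j], 0) + 1
--     score = []
--     for i in range(n):
--         if green[i]:
--             score.append("=")
--         elif avail.get(guess[i], 0) > 0:
--             avail[guess[i]] -= 1
--             score.append("^")
--         else:
--             score.append(" ")
--     return ''.join(score)
--
-- def isEliminated(possibleAnswer: str, guess: str, clues: str):
--     isUsed = [False, False, False, False, False]
--     for i in range(len(guess)):
--         if clues[i] == '=':
--             if possibleAnswer[i] != guess[i]:
--                 return True
--             isUsed[i] = True
--
--     for i in range(len(guess)):
--         if clues[i] == ' ':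
--             for j in range(len(guess)):
--                 if guess[i] == possibleAnswer[j] and not isUsed[j]:
--                     return True
--         elif clues[i] == '^':
--             if possibleAnswer[i] == guess[i]:
--                 return True
--             foundOne = False
--             for j in range(len(guess)):
--                 if guess[i] == possibleAnswer[j] and not isUsed[j]:
--                     isUsed[j] = True
--                     foundOne = True
--                     break
--             if not foundOne:
--                 return True
--     return False
--
-- def getBestChoice(possibleAnswers, allAllowedWords):
--     bestChoice, bestChoiceCount = "", 0
--     for choice in allAllowedWords:
--         cache = {}
--         total = 0
--         for target in possibleAnswers:
--             clue = checkAnswer(choice, target)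
--             if clue not in cache:
--                 n = 0
--                 for w in possibleAnswers:
--                     if w != choice and not isEliminated(w, choice, clue):
--                         n += 1
--                 cache[clue] = n
--             total += cache[clue]
--         if bestChoiceCount == 0 or bestChoiceCount > total:
--             bestChoice, bestChoiceCount = choice, total
--     return bestChoice, bestChoiceCount
-- ===== Notes on version B (the rewrite author's own statement) =====
-- stated objective: faster
-- what changed: B caches the surviving-candidate count per distinct clue pattern of each guess (computing the elimination scan once per pattern instead of once per target) and computes the clue with a letter-count dictionary instead of A's greedy used-array rescans.
-- outside the precondition, e.g. on getBestChoice(['abcdef'], ['abcdef']): A returns ('abcdef', 0), B returns ('abcdef', 0); on getBestChoice(['abcdef', 'bbbbbb'], ['abcdef']): A returns ('abcdef', 1), B returns ('abcdef', 1)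
import Mathlib
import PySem

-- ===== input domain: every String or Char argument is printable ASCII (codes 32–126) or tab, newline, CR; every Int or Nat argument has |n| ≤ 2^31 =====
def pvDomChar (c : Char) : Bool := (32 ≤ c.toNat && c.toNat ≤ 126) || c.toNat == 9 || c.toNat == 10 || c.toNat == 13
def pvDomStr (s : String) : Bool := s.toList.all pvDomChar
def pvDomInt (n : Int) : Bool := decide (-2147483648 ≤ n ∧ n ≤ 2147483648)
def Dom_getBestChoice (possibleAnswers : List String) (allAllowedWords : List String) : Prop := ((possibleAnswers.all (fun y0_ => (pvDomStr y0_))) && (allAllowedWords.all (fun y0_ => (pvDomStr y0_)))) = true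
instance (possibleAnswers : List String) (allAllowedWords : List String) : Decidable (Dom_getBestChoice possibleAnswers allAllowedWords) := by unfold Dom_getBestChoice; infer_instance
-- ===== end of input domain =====

-- B memoizes the remaining-candidate count per distinct clue pattern and computes the
-- clue with letter counts instead of A's greedy used-array scan; objective: faster.

-- ===== PORT A =====
-- Notes on both ports: 'range(len(...))' loops are ported as folds over 'List.range';
-- the 1-character strings appended to 'score'/'used' are ported as Char (''.join = String.mk);
-- in-range indexing 'xs[i]' (guaranteed under Pre_) is ported as 'List.getD'; Python's
-- early 'return True' in isEliminated is the 'none' state of an Option-valued fold.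
def checkAnswer (guess : String) (answer : String) : String :=
  let g := guess.toList
  let a := answer.toList
  let su1 := (List.range a.length).foldl
    (fun (su : List Char × List Char) i =>
      if g.getD i ' ' == a.getD i ' ' then (su.1 ++ ['='], su.2 ++ ['y'])
      else (su.1 ++ [' '], su.2 ++ [' '])) ([], [])
  let su2 := (List.range a.length).foldl
    (fun (su : List Char × List Char) i =>
      if su.1.getD i ' ' != '=' then
        -- 'for j …: if used[j]==" " and guess[i]==answer[j]: mark; break' = first such j
        match (List.range a.length).find?
            (fun j => su.2.getD j 'y' == ' ' && g.getD i ' ' == a.getD j ' ') with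
        | some j => (su.1.set i '^', su.2.set j 'y')
        | none => (su.1.set i ' ', su.2)
      else su) su1
  String.mk su2.1

def isEliminated (possibleAnswer : String) (guess : String) (clues : String) : Bool :=
  let pa := possibleAnswer.toList
  let g := guess.toList
  let cl := clues.toList
  let st1 : Option (List Bool) := (List.range g.length).foldl
    (fun st i =>
      match st with
      | none => none
      | some isUsed =>
        if cl.getD i ' ' == '=' then
          if pa.getD i ' ' != g.getD i ' ' then none
          else some (isUsed.set i true)
        else some isUsed) (some [false, false, false, false, false])
  let st2 : Option (List Bool) := (List.range g.length).foldl
    (fun st i =>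
      match st with
      | none => none
      | some isUsed =>
        if cl.getD i ' ' == ' ' then
          if (List.range g.length).any
              (fun j => g.getD i ' ' == pa.getD j ' ' && !(isUsed.getD j true)) then none
          else some isUsed
        else if cl.getD i ' ' == '^' then
          if pa.getD i ' ' == g.getD i ' ' then none
          else
            match (List.range g.length).find?
                (fun j => g.getD i ' ' == pa.getD j ' ' && !(isUsed.getD j true)) with
            | some j => some (isUsed.set j true)
            | none => none
        else some isUsed) st1
  st2.isNone

def getRemainingChoiceCount (possibleAnswers : List String) (choice : String) : Int :=
  possibleAnswers.foldl
    (fun total possibleTarget =>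
      let clue := checkAnswer choice possibleTarget
      possibleAnswers.foldl
        (fun t nextChoice =>
          if nextChoice != choice && !(isEliminated nextChoice choice clue) then t + 1 else t)
        total) 0

def getBestChoice (possibleAnswers : List String) (allAllowedWords : List String) : String × Int :=
  let b := allAllowedWords.foldl
    (fun (b : Int × String) choice =>
      let totalRemainingChoices := getRemainingChoiceCount possibleAnswers choice
      if b.1 == 0 || b.1 > totalRemainingChoices then (totalRemainingChoices, choice) else b)
    (0, "")
  (b.2, b.1)

-- ===== PORT B =====
-- B's clue computation: greens, then a letter-count dict for the yellows.
def checkAnswerAlt (guess : String) (answer : String) : String :=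
  let g := guess.toList
  let a := answer.toList
  let n := a.length
  let green := (List.range n).map (fun i => g.getD i ' ' == a.getD i ' ')
  let avail := (List.range n).foldl
    (fun (d : PySem.Dict Char Int) j =>
      if !(green.getD j true) then d.modify (a.getD j ' ') 0 (· + 1) else d) PySem.Dict.empty
  let r := (List.range n).foldl
    (fun (sa : List Char × PySem.Dict Char Int) i =>
      if green.getD i true then (sa.1 ++ ['='], sa.2)
      else if sa.2.getD (g.getD i ' ') 0 > 0 then
        (sa.1 ++ ['^'], sa.2.modify (g.getD i ' ') 0 (· - 1))
      else (sa.1 ++ [' '], sa.2)) ([], avail)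
  String.mk r.1

-- B's main loop: per choice, a cache clue ↦ survivor count, filled on first sight of a clue.
-- (isEliminated is the module's helper, reused unchanged by B.)
def getBestChoice_alt (possibleAnswers : List String) (allAllowedWords : List String) : String × Int :=
  let b := allAllowedWords.foldl
    (fun (b : Int × String) choice =>
      let tc := possibleAnswers.foldl
        (fun (tc : Int × PySem.Dict String Int) target =>
          let clue := checkAnswerAlt choice target
          let cache :=
            if tc.2.contains clue then tc.2
            else tc.2.insert clue
              (possibleAnswers.foldl
                (fun n w =>
                  if w != choice && !(isEliminated w choice clue) then n + 1 else n) (0 : Int))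
          (tc.1 + cache.getD clue 0, cache)) ((0 : Int), PySem.Dict.empty)
      if b.1 == 0 || b.1 > tc.1 then (tc.1, choice) else b)
    (0, "")
  (b.2, b.1)

-- ===== PRECONDITION & SPEC =====
-- Pre_ excludes inputs on which A's cross-indexing (guess[i] for i < len(answer),
-- clues[i]/isUsed[i] with a fixed 5-slot isUsed array) raises IndexError: it keeps the
-- natural Wordle domain, all words of one common length ≤ 5 (plus the degenerate inputs
-- with no possible answers or no allowed words, where A scans nothing and returns).
-- Equal-length words longer than 5 only escape the crash when no elimination check ever
-- touches a position ≥ 5 (e.g. no distinct pair of words); there A and B agree anyway,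
-- but such inputs are excluded with the rest for uniformity of the condition.
def Pre_getBestChoice (possibleAnswers : List String) (allAllowedWords : List String) : Prop :=
  possibleAnswers = [] ∨ allAllowedWords = [] ∨
    ∀ w ∈ possibleAnswers ++ allAllowedWords,
      w.length ≤ 5 ∧ w.length = ((possibleAnswers ++ allAllowedWords).headD "").length
instance (possibleAnswers : List String) (allAllowedWords : List String) :
    Decidable (Pre_getBestChoice possibleAnswers allAllowedWords) := by
  unfold Pre_getBestChoice; infer_instance

def pvWitness_getBestChoice : List String × List String := (["ab", "cd"], ["ab", "ce"])

def Spec_getBestChoice (possibleAnswers : List String) (allAllowedWords : List String)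
    (out : String × Int) : Prop := out = getBestChoice_alt possibleAnswers allAllowedWords
instance (possibleAnswers : List String) (allAllowedWords : List String) (out : String × Int) :
    Decidable (Spec_getBestChoice possibleAnswers allAllowedWords out) := by
  unfold Spec_getBestChoice; infer_instance

-- ===== CLAIM (what is proved, stated in full; the proofs are below) =====
def Claim_equal_getBestChoice : Prop := ∀ (possibleAnswers : List String) (allAllowedWords : List String), Dom_getBestChoice possibleAnswers allAllowedWords → Pre_getBestChoice possibleAnswers allAllowedWords → Spec_getBestChoice possibleAnswers allAllowedWords (getBestChoice possibleAnswers allAllowedWords)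

-- ===== LEMMAS AND PROOFS =====

-- The two ports in fact agree on every input (both are total functions of the character
-- lists; Pre_ only matters for faithfulness to the raising Python).  We prove
-- 'clue_eq : checkAnswer = checkAnswerAlt' and then the memoization identity.

-- score/used after A's first loop, as maps
def pvScore0 (g a : List Char) : List Char :=
  (List.range a.length).map (fun i => if g.getD i ' ' == a.getD i ' ' then '=' else ' ')
def pvUsed0 (g a : List Char) : List Char :=
  (List.range a.length).map (fun i => if g.getD i ' ' == a.getD i ' ' then 'y' else ' ')

-- unused occurrences of letter c in the answer
def pvCnt (a u : List Char) (c : Char) : Nat :=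
  (List.range a.length).countP (fun j => u.getD j 'y' == ' ' && c == a.getD j ' ')

def pvGreen (g a : List Char) : List Bool :=
  (List.range a.length).map (fun i => g.getD i ' ' == a.getD i ' ')

theorem pvMap_getD {β : Type} (f : Nat → β) (n j : Nat) (d : β) (hj : j < n) :
    ((List.range n).map f).getD j d = f j := by
  simp [List.getD_eq_getElem?_getD, hj]

theorem pvGetDMid (l1 l2 : List Char) (x d : Char) : (l1 ++ x :: l2).getD l1.length d = x := by
  simp [List.getD_eq_getElem?_getD]

theorem pvSetMid (l1 l2 : List Char) (x v : Char) :
    (l1 ++ x :: l2).set l1.length v = l1 ++ v :: l2 := by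
  induction l1 with
  | nil => rfl
  | cons y t ih => simp [ih]

theorem pvPhase1 (g a : List Char) (m : Nat) :
    (List.range m).foldl
      (fun (su : List Char × List Char) i =>
        if g.getD i ' ' == a.getD i ' ' then (su.1 ++ ['='], su.2 ++ ['y'])
        else (su.1 ++ [' '], su.2 ++ [' '])) ([], [])
    = ((List.range m).map (fun i => if g.getD i ' ' == a.getD i ' ' then '=' else ' '),
       (List.range m).map (fun i => if g.getD i ' ' == a.getD i ' ' then 'y' else ' ')) := by
  induction m with
  | zero => rfl
  | succ n ih =>
    rw [List.range_succ]
    simp only [List.foldl_append, List.foldl_cons, List.foldl_nil, ih, List.map_append,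
      List.map_cons, List.map_nil]
    split_ifs <;> rfl

theorem pvCnt_set (a u : List Char) (j0 : Nat) (hj : j0 < a.length) (hju : j0 < u.length)
    (hu : u.getD j0 'y' = ' ') (c : Char) :
    pvCnt a u c = pvCnt a (u.set j0 'y') c + (if c == a.getD j0 ' ' then 1 else 0) := by
  unfold pvCnt
  have hmem : j0 ∈ List.range a.length := List.mem_range.mpr hj
  have hperm := List.perm_cons_erase hmem
  rw [hperm.countP_eq, hperm.countP_eq, List.countP_cons, List.countP_cons]
  have htail : ((List.range a.length).erase j0).countP
      (fun j => (u.set j0 'y').getD j 'y' == ' ' && c == a.getD j ' ')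
      = ((List.range a.length).erase j0).countP
        (fun j => u.getD j 'y' == ' ' && c == a.getD j ' ') := by
    apply List.countP_congr
    intro j hjmem
    have hne : j ≠ j0 := ((List.nodup_range).mem_erase_iff.mp hjmem).1
    simp [List.getD_eq_getElem?_getD, List.getElem?_set_ne (Ne.symm hne)]
  have h1 : (u.set j0 'y').getD j0 'y' = 'y' := by
    simp [List.getD_eq_getElem?_getD, hju]
  rw [htail, hu, h1]
  by_cases hc : (c == a.getD j0 ' ') = true <;> simp

theorem pvAvail (g a : List Char) (c : Char) :
    ((List.range a.length).foldl
      (fun (d : PySem.Dict Char Int) j =>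
        if !((pvGreen g a).getD j true) then d.modify (a.getD j ' ') 0 (· + 1) else d)
      PySem.Dict.empty).getD c 0
    = (pvCnt a ((List.range a.length).map
        (fun i => if g.getD i ' ' == a.getD i ' ' then 'y' else ' ')) c : Int) := by
  rw [PySem.List.foldl_if_eq_foldl_filter
      (p := fun j => !((pvGreen g a).getD j true))
      (f := fun (d : PySem.Dict Char Int) j => d.modify (a.getD j ' ') 0 (· + 1))]
  rw [← List.foldl_map (f := fun j => a.getD j ' ')
      (g := fun (d : PySem.Dict Char Int) x => d.modify x 0 (· + 1))]
  rw [PySem.Dict.getD_foldl_modify_add_one]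
  rw [PySem.Dict.getD_empty, List.count_eq_countP, List.countP_map, List.countP_filter]
  unfold pvCnt
  rw [Int.zero_add]
  congr 1
  apply List.countP_congr
  intro j hjmem
  have hjn : j < a.length := List.mem_range.mp hjmem
  have hgreen : (pvGreen g a).getD j true = (g.getD j ' ' == a.getD j ' ') :=
    pvMap_getD _ _ _ _ hjn
  have hused : ((List.range a.length).map
      (fun i => if g.getD i ' ' == a.getD i ' ' then 'y' else ' ')).getD j 'y'
      = (if g.getD j ' ' == a.getD j ' ' then 'y' else ' ') := pvMap_getD _ _ _ _ hjn
  rw [Function.comp_apply, hgreen, hused]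
  simp
  constructor
  · rintro ⟨h1, h2⟩; exact ⟨h2, h1.symm⟩
  · rintro ⟨h1, h2⟩; exact ⟨h2.symm, h1⟩

theorem pvPhase2 (g a : List Char) :
    ∀ (m k : Nat) (sB uA : List Char) (av : PySem.Dict Char Int),
    k + m = a.length → sB.length = k → uA.length = a.length →
    (∀ c, av.getD c 0 = (pvCnt a uA c : Int)) →
    ((List.range' k m).foldl
      (fun (su : List Char × List Char) i =>
        if su.1.getD i ' ' != '=' then
          match (List.range a.length).find?
              (fun j => su.2.getD j 'y' == ' ' && g.getD i ' ' == a.getD j ' ') with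
          | some j => (su.1.set i '^', su.2.set j 'y')
          | none => (su.1.set i ' ', su.2)
        else su)
      (sB ++ ((List.range a.length).map
        (fun i => if g.getD i ' ' == a.getD i ' ' then '=' else ' ')).drop k, uA)).1
    = ((List.range' k m).foldl
      (fun (sa : List Char × PySem.Dict Char Int) i =>
        if (pvGreen g a).getD i true then (sa.1 ++ ['='], sa.2)
        else if sa.2.getD (g.getD i ' ') 0 > 0 then
          (sa.1 ++ ['^'], sa.2.modify (g.getD i ' ') 0 (· - 1))
        else (sa.1 ++ [' '], sa.2)) (sB, av)).1 := by
  intro m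
  induction m with
  | zero =>
    intro k sB uA av hk hs hu hinv
    simp only [List.range'_zero, List.foldl_nil]
    have hnil : (((List.range a.length).map
        (fun i => if g.getD i ' ' == a.getD i ' ' then '=' else ' ')).drop k) = [] := by
      apply List.drop_eq_nil_of_le
      simp
      omega
    rw [hnil, List.append_nil]
  | succ m ih =>
    intro k sB uA av hk hs hu hinv
    have hkn : k < a.length := by omega
    rw [List.range'_succ, List.foldl_cons, List.foldl_cons]
    have hdrop : (((List.range a.length).map
        (fun i => if g.getD i ' ' == a.getD i ' ' then '=' else ' ')).drop k)
        = (if g.getD k ' ' == a.getD k ' ' then '=' else ' ')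
          :: (((List.range a.length).map
            (fun i => if g.getD i ' ' == a.getD i ' ' then '=' else ' ')).drop (k+1)) := by
      have hlen : k < (((List.range a.length).map
          (fun i => if g.getD i ' ' == a.getD i ' ' then '=' else ' '))).length := by
        simpa using hkn
      rw [List.drop_eq_getElem_cons hlen]
      congr 1
      simp [hkn]
    have hgreen : (pvGreen g a).getD k true = (g.getD k ' ' == a.getD k ' ') :=
      pvMap_getD _ _ _ _ hkn
    by_cases hg : (g.getD k ' ' == a.getD k ' ') = true
    · -- green position: A skips ('=' != '=' is false), B appends '='
      have hsA : (sB ++ (((List.range a.length).map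
          (fun i => if g.getD i ' ' == a.getD i ' ' then '=' else ' ')).drop k)).getD k ' '
          = '=' := by
        rw [hdrop, if_pos hg, ← hs]; exact pvGetDMid ..
      simp only [hsA, hgreen, hg, if_true, bne_self_eq_false, Bool.false_eq_true, if_false]
      have hstate : sB ++ (((List.range a.length).map
          (fun i => if g.getD i ' ' == a.getD i ' ' then '=' else ' ')).drop k)
          = (sB ++ ['=']) ++ (((List.range a.length).map
            (fun i => if g.getD i ' ' == a.getD i ' ' then '=' else ' ')).drop (k+1)) := by
        rw [hdrop, if_pos hg, List.append_assoc]; rfl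
      rw [hstate]
      exact ih (k+1) (sB ++ ['=']) uA av (by omega) (by simp [hs]) hu hinv
    · -- non-green position
      have hsA : (sB ++ (((List.range a.length).map
          (fun i => if g.getD i ' ' == a.getD i ' ' then '=' else ' ')).drop k)).getD k ' '
          = ' ' := by
        rw [hdrop, if_neg hg, ← hs]; exact pvGetDMid ..
      have hset : ∀ v : Char, (sB ++ (((List.range a.length).map
          (fun i => if g.getD i ' ' == a.getD i ' ' then '=' else ' ')).drop k)).set k v
          = (sB ++ [v]) ++ (((List.range a.length).map
            (fun i => if g.getD i ' ' == a.getD i ' ' then '=' else ' ')).drop (k+1)) := by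
        intro v
        rw [hdrop, if_neg hg, ← hs, pvSetMid, List.append_assoc]; rfl
      simp only [hsA, hgreen, hg, Bool.false_eq_true, if_false]
      cases hfind : (List.range a.length).find?
          (fun j => uA.getD j 'y' == ' ' && g.getD k ' ' == a.getD j ' ') with
      | none =>
        have hcnt : pvCnt a uA (g.getD k ' ') = 0 := by
          unfold pvCnt
          rw [List.countP_eq_zero]
          intro j hjmem
          have := List.find?_eq_none.mp hfind j hjmem
          simpa using this
        have hav : av.getD (g.getD k ' ') 0 = 0 := by rw [hinv, hcnt]; rfl
        simp only [hav, gt_iff_lt, lt_irrefl, if_false, bne]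
        rw [hset ' ']
        exact ih (k+1) (sB ++ [' ']) uA av (by omega) (by simp [hs]) hu hinv
      | some j0 =>
        have hp := List.find?_some hfind
        have hj0n : j0 < a.length := List.mem_range.mp (List.mem_of_find?_eq_some hfind)
        rw [Bool.and_eq_true] at hp
        have hu0 : uA.getD j0 'y' = ' ' := by simpa [beq_iff_eq] using hp.1
        have hga : g.getD k ' ' = a.getD j0 ' ' := by simpa [beq_iff_eq] using hp.2
        have hpos : 0 < pvCnt a uA (g.getD k ' ') := by
          unfold pvCnt
          exact List.countP_pos_iff.mpr
            ⟨j0, List.mem_range.mpr hj0n, by rw [hu0, hga]; simp⟩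
        have hav : 0 < av.getD (g.getD k ' ') 0 := by
          rw [hinv]; exact_mod_cast hpos
        simp only [gt_iff_lt, hav, if_true, bne]
        rw [hset '^']
        apply ih (k+1) (sB ++ ['^']) (uA.set j0 'y')
          (av.modify (g.getD k ' ') 0 (· - 1)) (by omega) (by simp [hs]) (by simp [hu])
        intro c
        rw [PySem.Dict.getD_modify]
        by_cases hc : c = g.getD k ' '
        · rw [if_pos hc, hinv]
          have h2 : pvCnt a uA (g.getD k ' ')
              = pvCnt a (uA.set j0 'y') (g.getD k ' ') + 1 := by
            have h3 := pvCnt_set a uA j0 hj0n (by omega) hu0 (g.getD k ' ')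
            have hbeq : (g.getD k ' ' == a.getD j0 ' ') = true := by rw [hga]; simp
            rw [hbeq, if_pos rfl] at h3
            exact h3
          rw [hc, h2]
          push_cast
          ring
        · rw [if_neg hc, hinv]
          have h3 := pvCnt_set a uA j0 hj0n (by omega) hu0 c
          have hbeq : (c == a.getD j0 ' ') = false := by
            rw [← hga]
            simp only [beq_eq_false_iff_ne, ne_eq]
            exact hc
          rw [hbeq] at h3
          simp at h3
          rw [h3]

theorem clue_eq (guess answer : String) : checkAnswer guess answer = checkAnswerAlt guess answer := by
  unfold checkAnswer checkAnswerAlt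
  dsimp only
  rw [pvPhase1]
  have hgr : (List.range answer.toList.length).map
      (fun i => guess.toList.getD i ' ' == answer.toList.getD i ' ')
      = pvGreen guess.toList answer.toList := rfl
  rw [hgr]
  congr 1
  have h := pvPhase2 guess.toList answer.toList answer.toList.length 0 []
    ((List.range answer.toList.length).map
      (fun i => if guess.toList.getD i ' ' == answer.toList.getD i ' ' then 'y' else ' '))
    ((List.range answer.toList.length).foldl
      (fun (d : PySem.Dict Char Int) j =>
        if !((pvGreen guess.toList answer.toList).getD j true) then
          d.modify (answer.toList.getD j ' ') 0 (· + 1)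
        else d) PySem.Dict.empty)
    (by omega) rfl (by simp) (fun c => pvAvail guess.toList answer.toList c)
  rw [show ([] : List Char) ++ (((List.range answer.toList.length).map
      (fun i => if guess.toList.getD i ' ' == answer.toList.getD i ' ' then '=' else ' ')).drop 0)
    = ((List.range answer.toList.length).map
      (fun i => if guess.toList.getD i ' ' == answer.toList.getD i ' ' then '=' else ' '))
    from by simp] at h
  rw [← List.range_eq_range'] at h
  exact h

-- survivor count for a fixed clue
def pvCP (pa : List String) (choice clue : String) : Int :=
  (pa.countP (fun w => w != choice && !(isEliminated w choice clue)) : Int)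

theorem memo_lemma (pa : List String) (choice : String) :
    ∀ (pa' : List String) (t0 : Int) (cache : PySem.Dict String Int),
      (∀ k v, cache.get? k = some v → v = pvCP pa choice k) →
      ((pa'.foldl
        (fun (tc : Int × PySem.Dict String Int) target =>
          let clue := checkAnswerAlt choice target
          let cache :=
            if tc.2.contains clue then tc.2
            else tc.2.insert clue
              (pa.foldl
                (fun n w =>
                  if w != choice && !(isEliminated w choice clue) then n + 1 else n) (0 : Int))
          (tc.1 + cache.getD clue 0, cache)) (t0, cache)).1)
      = t0 + (pa'.map (fun t => pvCP pa choice (checkAnswerAlt choice t))).sum := by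
  intro pa'
  induction pa' with
  | nil => intro t0 cache hinv; simp
  | cons target rest ih =>
    intro t0 cache hinv
    simp only [List.foldl_cons, List.map_cons, List.sum_cons]
    by_cases hc : cache.contains (checkAnswerAlt choice target) = true
    · have hsome : (cache.get? (checkAnswerAlt choice target)).isSome := by
        rw [← PySem.Dict.contains_eq_isSome_get?]; exact hc
      obtain ⟨v, hv⟩ := Option.isSome_iff_exists.mp hsome
      have hgd : cache.getD (checkAnswerAlt choice target) 0
          = pvCP pa choice (checkAnswerAlt choice target) := by
        rw [PySem.Dict.getD_eq_get?_getD, hv]; exact hinv _ _ hv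
      simp only [hc, if_true]
      rw [ih (t0 + cache.getD (checkAnswerAlt choice target) 0) cache hinv, hgd]
      ring
    · have hval : pa.foldl
          (fun n w =>
            if w != choice && !(isEliminated w choice (checkAnswerAlt choice target)) then n + 1
            else n) (0 : Int) = pvCP pa choice (checkAnswerAlt choice target) := by
        simpa [pvCP] using PySem.List.foldl_if_add_one
          (l := pa) (a := (0 : Int))
          (p := fun w => w != choice && !(isEliminated w choice (checkAnswerAlt choice target)))
      simp only [hc, if_false, Bool.false_eq_true]
      have hinv' : ∀ k v,
          (cache.insert (checkAnswerAlt choice target)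
            (pa.foldl (fun n w =>
              if w != choice && !(isEliminated w choice (checkAnswerAlt choice target)) then n + 1
              else n) (0 : Int))).get? k = some v → v = pvCP pa choice k := by
        intro k v hk
        rw [PySem.Dict.get?_insert] at hk
        by_cases hkc : k = checkAnswerAlt choice target
        · rw [if_pos hkc] at hk
          subst hkc
          rw [hval] at hk
          exact (Option.some_inj.mp hk).symm
        · rw [if_neg hkc] at hk
          exact hinv _ _ hk
      rw [ih _ _ hinv', PySem.Dict.getD_insert, if_pos rfl, hval]
      ring

theorem count_eq (pa : List String) (choice : String) :
    getRemainingChoiceCount pa choice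
      = (pa.map (fun t => pvCP pa choice (checkAnswerAlt choice t))).sum := by
  unfold getRemainingChoiceCount
  have h1 : ∀ (total : Int) (clue : String),
      pa.foldl
        (fun t nextChoice =>
          if nextChoice != choice && !(isEliminated nextChoice choice clue) then t + 1 else t)
        total = total + pvCP pa choice clue := by
    intro total clue
    simpa [pvCP] using PySem.List.foldl_if_add_one
      (l := pa) (a := total)
      (p := fun w => w != choice && !(isEliminated w choice clue))
  simp only [h1]
  rw [PySem.List.foldl_add (g := fun t => pvCP pa choice (checkAnswer choice t))]
  simp [clue_eq]

-- ===== VERDICT (by name: the statement is the Claim_ definition above) =====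
theorem getBestChoice_spec : Claim_equal_getBestChoice := by
  unfold Claim_equal_getBestChoice
  intro pa aw _ _
  unfold Spec_getBestChoice getBestChoice getBestChoice_alt
  have h : ∀ choice : String,
      getRemainingChoiceCount pa choice
        = (pa.foldl
            (fun (tc : Int × PySem.Dict String Int) target =>
              let clue := checkAnswerAlt choice target
              let cache :=
                if tc.2.contains clue then tc.2
                else tc.2.insert clue
                  (pa.foldl
                    (fun n w =>
                      if w != choice && !(isEliminated w choice clue) then n + 1 else n) (0 : Int))
              (tc.1 + cache.getD clue 0, cache)) ((0 : Int), PySem.Dict.empty)).1 := by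
    intro choice
    rw [count_eq pa choice, memo_lemma pa choice pa 0 PySem.Dict.empty]
    · simp
    · intro k v hk; simp [PySem.Dict.get?_empty] at hk
  refine congrArg (fun b : Int × String => (b.2, b.1)) ?_
  apply PySem.List.foldl_congr_mem
  intro acc choice _
  simp only [← h choice]
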